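-- pv_equiv track=rewrite | github.com/tptorres/algorithms | GK/DP/number_factors.py | number_factors_opt
-- ===== SOURCE A (Python) =====
-- def number_factors_opt(n):
--     n1, n2, n3, n4 = 1, 1, 1, 2
--     temp = 0
--     for i in range(4, n+1):
--         temp = n1 + n2 + n4
--         n1 = n2
--         n2 = n3
--         n3 = n4
--         n4 = temp
--     return n4
-- ===== SOURCE B (Python) =====
-- def number_factors_opt(n):
--     # a(i) = a(i-1) + a(i-3) + a(i-4); a(3) = 2 and a(i) = 2 for all i <= 3 in A.
--     # Computed by binary exponentiation of the companion matrix: O(log n).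
--     if n <= 3:
--         return 2
--     def mul(X, Y):
--         return tuple(tuple(sum(X[i][t] * Y[t][j] for t in range(4)) for j in range(4))
--                      for i in range(4))
--     M = ((0, 1, 0, 0),
--          (0, 0, 1, 0),
--          (0, 0, 0, 1),
--          (1, 1, 0, 1))
--     R = ((1, 0, 0, 0),
--          (0, 1, 0, 0),
--          (0, 0, 1, 0),
--          (0, 0, 0, 1))
--     k = n - 3
--     B = M
--     while k:
--         if k & 1:
--             R = mul(R, B)
--         B = mul(B, B)
--         k >>= 1
--     v = (1, 1, 1, 2)
--     return sum(R[3][j] * v[j] for j in range(4))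
-- ===== Notes on version B (the rewrite author's own statement) =====
-- stated objective: faster
-- what changed: Replaced the O(n) four-register recurrence loop with binary exponentiation of the 4x4 companion matrix of a(i)=a(i-1)+a(i-3)+a(i-4), applied to the initial vector (1,1,1,2).
import Mathlib
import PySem

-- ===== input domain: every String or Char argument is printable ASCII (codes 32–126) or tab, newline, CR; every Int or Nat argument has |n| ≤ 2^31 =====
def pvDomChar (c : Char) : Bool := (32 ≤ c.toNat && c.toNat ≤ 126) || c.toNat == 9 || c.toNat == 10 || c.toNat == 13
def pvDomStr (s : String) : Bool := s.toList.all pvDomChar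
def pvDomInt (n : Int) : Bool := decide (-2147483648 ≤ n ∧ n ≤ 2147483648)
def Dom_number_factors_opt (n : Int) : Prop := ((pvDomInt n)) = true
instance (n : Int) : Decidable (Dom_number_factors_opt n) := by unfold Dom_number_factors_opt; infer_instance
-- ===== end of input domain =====

-- B replaces A's O(n) four-register loop by binary exponentiation of the 4x4
-- companion matrix of a(i)=a(i-1)+a(i-3)+a(i-4): O(log n) (objective: faster).

-- ===== PORT A =====
-- literal port of A: fold the loop body over range(4, n+1), state (n1,n2,n3,n4,temp)
def number_factors_opt (n : Int) : Int :=
  let s := (PySem.List.pyRange 4 (n + 1) 1).foldl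
    (fun (st : Int × Int × Int × Int × Int) _ =>
      let temp := st.1 + st.2.1 + st.2.2.2.1
      (st.2.1, st.2.2.1, st.2.2.2.1, temp, temp))
    (1, 1, 1, 2, 0)
  s.2.2.2.1

-- ===== PORT B =====
-- Source B's 4x4 matrix (tuple of rows) as a 16-field structure
structure Mat where
  a11 : Int
  a12 : Int
  a13 : Int
  a14 : Int
  a21 : Int
  a22 : Int
  a23 : Int
  a24 : Int
  a31 : Int
  a32 : Int
  a33 : Int
  a34 : Int
  a41 : Int
  a42 : Int
  a43 : Int
  a44 : Int
deriving DecidableEq, Repr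

-- Source B's mul(X, Y): entrywise sum of four products
def matMul (X Y : Mat) : Mat :=
  ⟨X.a11*Y.a11 + X.a12*Y.a21 + X.a13*Y.a31 + X.a14*Y.a41,
   X.a11*Y.a12 + X.a12*Y.a22 + X.a13*Y.a32 + X.a14*Y.a42,
   X.a11*Y.a13 + X.a12*Y.a23 + X.a13*Y.a33 + X.a14*Y.a43,
   X.a11*Y.a14 + X.a12*Y.a24 + X.a13*Y.a34 + X.a14*Y.a44,
   X.a21*Y.a11 + X.a22*Y.a21 + X.a23*Y.a31 + X.a24*Y.a41,
   X.a21*Y.a12 + X.a22*Y.a22 + X.a23*Y.a32 + X.a24*Y.a42,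
   X.a21*Y.a13 + X.a22*Y.a23 + X.a23*Y.a33 + X.a24*Y.a43,
   X.a21*Y.a14 + X.a22*Y.a24 + X.a23*Y.a34 + X.a24*Y.a44,
   X.a31*Y.a11 + X.a32*Y.a21 + X.a33*Y.a31 + X.a34*Y.a41,
   X.a31*Y.a12 + X.a32*Y.a22 + X.a33*Y.a32 + X.a34*Y.a42,
   X.a31*Y.a13 + X.a32*Y.a23 + X.a33*Y.a33 + X.a34*Y.a43,
   X.a31*Y.a14 + X.a32*Y.a24 + X.a33*Y.a34 + X.a34*Y.a44,
   X.a41*Y.a11 + X.a42*Y.a21 + X.a43*Y.a31 + X.a44*Y.a41,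
   X.a41*Y.a12 + X.a42*Y.a22 + X.a43*Y.a32 + X.a44*Y.a42,
   X.a41*Y.a13 + X.a42*Y.a23 + X.a43*Y.a33 + X.a44*Y.a43,
   X.a41*Y.a14 + X.a42*Y.a24 + X.a43*Y.a34 + X.a44*Y.a44⟩

def matM : Mat := ⟨0,1,0,0, 0,0,1,0, 0,0,0,1, 1,1,0,1⟩
def matI : Mat := ⟨1,0,0,0, 0,1,0,0, 0,0,1,0, 0,0,0,1⟩

-- Source B's 'while k:' square-and-multiply loop (low bit first)
def matLoop (k : Nat) (R B : Mat) : Mat :=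
  if _h : k = 0 then R
  else matLoop (k / 2) (if k % 2 = 1 then matMul R B else R) (matMul B B)
decreasing_by exact Nat.div_lt_self (Nat.pos_of_ne_zero _h) (by norm_num)

def number_factors_opt_alt (n : Int) : Int :=
  if n ≤ 3 then 2
  else
    let R := matLoop (n - 3).toNat matI matM
    -- sum(R[3][j]*v[j] for j in range(4)) with v = (1,1,1,2), written out
    R.a41 * 1 + R.a42 * 1 + R.a43 * 1 + R.a44 * 2

-- ===== PRECONDITION & SPEC =====
def Spec_number_factors_opt (n : Int) (out : Int) : Prop := out = number_factors_opt_alt n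
instance (n : Int) (out : Int) : Decidable (Spec_number_factors_opt n out) := by unfold Spec_number_factors_opt; infer_instance

-- ===== CLAIM (what is proved, stated in full; the proofs are below) =====
def Claim_equal_number_factors_opt : Prop := ∀ (n : Int), Dom_number_factors_opt n → Spec_number_factors_opt n (number_factors_opt n)

-- ===== LEMMAS AND PROOFS =====

def pvStep (v : Int × Int × Int × Int) : Int × Int × Int × Int :=
  (v.2.1, v.2.2.1, v.2.2.2, v.1 + v.2.1 + v.2.2.2)

def pvStep5 (st : Int × Int × Int × Int × Int) : Int × Int × Int × Int × Int :=
  let temp := st.1 + st.2.1 + st.2.2.2.1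
  (st.2.1, st.2.2.1, st.2.2.2.1, temp, temp)

def pvProj (s : Int × Int × Int × Int × Int) : Int × Int × Int × Int :=
  (s.1, s.2.1, s.2.2.1, s.2.2.2.1)

def mpow (B : Mat) : Nat → Mat
  | 0 => matI
  | k + 1 => matMul B (mpow B k)

def matApp (X : Mat) (v : Int × Int × Int × Int) : Int × Int × Int × Int :=
  (X.a11*v.1 + X.a12*v.2.1 + X.a13*v.2.2.1 + X.a14*v.2.2.2,
   X.a21*v.1 + X.a22*v.2.1 + X.a23*v.2.2.1 + X.a24*v.2.2.2,
   X.a31*v.1 + X.a32*v.2.1 + X.a33*v.2.2.1 + X.a34*v.2.2.2,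
   X.a41*v.1 + X.a42*v.2.1 + X.a43*v.2.2.1 + X.a44*v.2.2.2)

theorem matMul_assoc (X Y Z : Mat) : matMul (matMul X Y) Z = matMul X (matMul Y Z) := by
  cases X; cases Y; cases Z
  simp only [matMul, Mat.mk.injEq]
  and_intros <;> ring

theorem matMul_I (X : Mat) : matMul X matI = X := by
  cases X; simp only [matMul, matI, Mat.mk.injEq]; and_intros <;> ring

theorem I_matMul (X : Mat) : matMul matI X = X := by
  cases X; simp only [matMul, matI, Mat.mk.injEq]; and_intros <;> ring

theorem mpow_sq (B : Mat) (m : Nat) : mpow (matMul B B) m = mpow B (2 * m) := by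
  induction m with
  | zero => rfl
  | succ m ih =>
      have : 2 * (m + 1) = (2 * m) + 1 + 1 := by omega
      rw [this]
      show matMul (matMul B B) (mpow (matMul B B) m) = matMul B (matMul B (mpow B (2 * m)))
      rw [ih, matMul_assoc]

theorem matLoop_spec (k : Nat) : ∀ R B : Mat, matLoop k R B = matMul R (mpow B k) := by
  induction k using Nat.strong_induction_on with
  | _ k ih =>
    intro R B
    by_cases h : k = 0
    · subst h; rw [matLoop]; simp [mpow, matMul_I]
    · rw [matLoop]; simp only [h, dite_false]
      rw [ih (k / 2) (Nat.div_lt_self (Nat.pos_of_ne_zero h) (by norm_num)), mpow_sq]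
      by_cases hb : k % 2 = 1
      · have hk : 2 * (k / 2) + 1 = k := by omega
        rw [if_pos hb, matMul_assoc]
        have h5 : matMul B (mpow B (2 * (k / 2))) = mpow B (2 * (k / 2) + 1) := rfl
        rw [h5, hk]
      · have hk : 2 * (k / 2) = k := by omega
        rw [if_neg hb, hk]

theorem matApp_mul (X Y : Mat) (v : Int × Int × Int × Int) :
    matApp (matMul X Y) v = matApp X (matApp Y v) := by
  cases X; cases Y; obtain ⟨a, b, c, d⟩ := v
  simp only [matMul, matApp, Prod.mk.injEq]
  and_intros <;> ring

theorem matApp_M (v : Int × Int × Int × Int) : matApp matM v = pvStep v := by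
  obtain ⟨a, b, c, d⟩ := v
  simp only [matApp, matM, pvStep, Prod.mk.injEq]
  and_intros <;> ring

theorem matApp_pow (k : Nat) (v : Int × Int × Int × Int) :
    matApp (mpow matM k) v = pvStep^[k] v := by
  induction k with
  | zero =>
      obtain ⟨a, b, c, d⟩ := v
      simp [mpow, matApp, matI]
  | succ k ih =>
      show matApp (matMul matM (mpow matM k)) v = pvStep^[k + 1] v
      rw [matApp_mul, ih, matApp_M, ← Function.iterate_succ_apply' pvStep]

theorem foldl_const {α β : Type} (g : α → α) (l : List β) :
    ∀ s : α, l.foldl (fun s _ => g s) s = g^[l.length] s := by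
  induction l with
  | nil => intro s; rfl
  | cons x xs ih =>
      intro s
      simp only [List.foldl_cons, List.length_cons, ih, Function.iterate_succ_apply]

theorem proj_iterate (k : Nat) (s : Int × Int × Int × Int × Int) :
    pvProj (pvStep5^[k] s) = pvStep^[k] (pvProj s) := by
  induction k generalizing s with
  | zero => rfl
  | succ k ih =>
      rw [Function.iterate_succ_apply, Function.iterate_succ_apply, ih]
      rfl

theorem A_iterate (n : Int) :
    number_factors_opt n = (pvStep^[(n - 3).toNat] (1, 1, 1, 2)).2.2.2 := by
  unfold number_factors_opt
  have h : (fun (st : Int × Int × Int × Int × Int) (_ : Int) =>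
      let temp := st.1 + st.2.1 + st.2.2.2.1
      (st.2.1, st.2.2.1, st.2.2.2.1, temp, temp)) = fun st _ => pvStep5 st := rfl
  rw [h, foldl_const pvStep5, PySem.List.length_pyRange_one]
  have hlen : (n + 1 - 4).toNat = (n - 3).toNat := by omega
  rw [hlen]
  have := proj_iterate (n - 3).toNat ((1 : Int), (1 : Int), (1 : Int), (2 : Int), (0 : Int))
  have h4 : (pvStep^[(n - 3).toNat] (1, 1, 1, 2)).2.2.2
      = (pvProj (pvStep5^[(n - 3).toNat] (1, 1, 1, 2, 0))).2.2.2 := by rw [this]; rfl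
  rw [h4]
  rfl

-- ===== VERDICT (by name: the statement is the Claim_ definition above) =====
theorem number_factors_opt_spec : Claim_equal_number_factors_opt := by
  intro n _
  unfold Spec_number_factors_opt number_factors_opt_alt
  by_cases h : n ≤ 3
  · simp only [h, if_pos]
    rw [A_iterate]
    have : (n - 3).toNat = 0 := by omega
    rw [this]; rfl
  · simp only [h, if_neg, not_false_iff]
    rw [A_iterate, matLoop_spec, I_matMul]
    have happ := matApp_pow (n - 3).toNat (1, 1, 1, 2)
    have h4 : (pvStep^[(n - 3).toNat] ((1:Int), (1:Int), (1:Int), (2:Int))).2.2.2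
        = (matApp (mpow matM (n - 3).toNat) (1, 1, 1, 2)).2.2.2 := by rw [happ]
    rw [h4]
    simp [matApp]
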